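-- pv_equiv track=rewrite | github.com/seoweed/algorithm | 프로그래머스/unrated/181890. 왼쪽 오른쪽/왼쪽 오른쪽.py | solution
-- ===== SOURCE A (Python) =====
-- def solution(str_list):
--     a = 0
--     for i in str_list:
--         if i == 'l':
--             return str_list[:a]
--         elif i == 'r':
--             return str_list[a + 1:]
--         a += 1
--     return []
-- ===== SOURCE B (Python) =====
-- def solution(str_list):
--     n = len(str_list)
--     li = str_list.index('l') if 'l' in str_list else n
--     ri = str_list.index('r') if 'r' in str_list else n
--     if li < ri:
--         return str_list[:li]
--     if ri < n:
--         return str_list[ri + 1:]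
--     return []
-- ===== Notes on version B (the rewrite author's own statement) =====
-- stated objective: idiomatic
-- what changed: Replaces the single early-returning indexed walk with an independent 'find both first positions (sentinel len when absent), then compare and slice' decomposition.
import Mathlib
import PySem

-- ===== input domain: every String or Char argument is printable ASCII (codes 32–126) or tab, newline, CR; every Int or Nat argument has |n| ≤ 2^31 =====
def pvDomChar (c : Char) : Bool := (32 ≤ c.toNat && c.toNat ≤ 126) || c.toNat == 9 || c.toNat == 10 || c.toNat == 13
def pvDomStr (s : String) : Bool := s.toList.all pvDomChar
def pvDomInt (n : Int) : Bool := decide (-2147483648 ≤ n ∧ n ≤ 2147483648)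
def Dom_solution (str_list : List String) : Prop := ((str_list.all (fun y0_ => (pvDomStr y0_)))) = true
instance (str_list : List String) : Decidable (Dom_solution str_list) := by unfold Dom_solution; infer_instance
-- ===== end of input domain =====

-- B replaces A's single early-returning indexed walk by 'find both first marker positions, then compare and slice' (idiomatic decomposition; same cost).

-- ===== PORT A =====
-- literal port of A's loop: walk str_list with counter a, return a slice at the first 'l' or 'r'
def solutionGo (full : List String) : List String → Int → List String
  | [], _ => []
  | i :: rest, a =>
    if i == "l" then PySem.List.slice full none (some a)
    else if i == "r" then PySem.List.slice full (some (a + 1)) none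
    else solutionGo full rest (a + 1)

def solution (str_list : List String) : List String :=
  solutionGo str_list str_list 0

-- ===== PORT B =====
def solution_alt (str_list : List String) : List String :=
  let n : Int := (str_list.length : Int)
  let li : Int := match PySem.List.index? str_list "l" with | some k => (k : Int) | none => n
  let ri : Int := match PySem.List.index? str_list "r" with | some k => (k : Int) | none => n
  if li < ri then PySem.List.slice str_list none (some li)
  else if ri < n then PySem.List.slice str_list (some (ri + 1)) none
  else []

-- ===== PRECONDITION & SPEC =====
def Spec_solution (str_list : List String) (out : List String) : Prop := out = solution_alt str_list
instance (str_list : List String) (out : List String) : Decidable (Spec_solution str_list out) := by unfold Spec_solution; infer_instance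

-- ===== CLAIM (what is proved, stated in full; the proofs are below) =====
def Claim_equal_solution : Prop := ∀ (str_list : List String), Dom_solution str_list → Spec_solution str_list (solution str_list)

-- ===== LEMMAS AND PROOFS =====

-- A's loop, characterised by the first indices of "l" and "r" in the remaining suffix.
theorem solutionGo_eq (full : List String) : ∀ (rest : List String) (a : Nat),
    solutionGo full rest (a : Int) =
      match PySem.List.index? rest "l", PySem.List.index? rest "r" with
      | none, none => []
      | some kl, none => PySem.List.slice full none (some ((a + kl : Nat) : Int))
      | none, some kr => PySem.List.slice full (some (((a + kr : Nat) : Int) + 1)) none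
      | some kl, some kr =>
          if kl < kr then PySem.List.slice full none (some ((a + kl : Nat) : Int))
          else PySem.List.slice full (some (((a + kr : Nat) : Int) + 1)) none := by
  intro rest
  induction rest with
  | nil => intro a; simp [solutionGo, PySem.List.index?]
  | cons i rest ih =>
    intro a
    by_cases hl : i = "l"
    · subst hl
      have hr : PySem.List.index? ("l" :: rest) "r" = (PySem.List.index? rest "r").map (· + 1) :=
        PySem.List.index?_cons_of_ne rest (by decide)
      simp only [solutionGo, PySem.List.index?_cons_self, hr]
      cases hkr : PySem.List.index? rest "r" with
      | none => simp
      | some kr => simp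
    · by_cases hr : i = "r"
      · subst hr
        have hl' : PySem.List.index? ("r" :: rest) "l" = (PySem.List.index? rest "l").map (· + 1) :=
          PySem.List.index?_cons_of_ne rest (by decide)
        simp only [solutionGo, PySem.List.index?_cons_self, hl']
        cases hkl : PySem.List.index? rest "l" with
        | none => simp
        | some kl => simp
      · have hl' : PySem.List.index? (i :: rest) "l" = (PySem.List.index? rest "l").map (· + 1) :=
          PySem.List.index?_cons_of_ne rest hl
        have hr' : PySem.List.index? (i :: rest) "r" = (PySem.List.index? rest "r").map (· + 1) :=
          PySem.List.index?_cons_of_ne rest hr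
        have hstep : ((a : Int) + 1) = ((a + 1 : Nat) : Int) := by push_cast; ring
        simp only [solutionGo, hl', hr', beq_iff_eq, hl, hr, if_false, hstep, ih (a + 1)]
        cases hkl : PySem.List.index? rest "l" with
        | none =>
          cases hkr : PySem.List.index? rest "r" with
          | none => simp
          | some kr => simp [Nat.add_assoc, Nat.add_comm 1 kr]
        | some kl =>
          cases hkr : PySem.List.index? rest "r" with
          | none => simp [Nat.add_assoc, Nat.add_comm 1 kl]
          | some kr => simp [Nat.add_assoc, Nat.add_comm 1 kl, Nat.add_comm 1 kr]

theorem index?_lt_length {xs : List String} {v : String} {k : Nat}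
    (h : PySem.List.index? xs v = some k) : k < xs.length := by
  obtain ⟨hk, _, _⟩ := PySem.List.getElem_of_index?_eq_some h
  exact hk

theorem index?_get {xs : List String} {v : String} {k : Nat}
    (h : PySem.List.index? xs v = some k) : ∃ (hk : k < xs.length), xs[k] = v := by
  obtain ⟨hk, hv, _⟩ := PySem.List.getElem_of_index?_eq_some h
  exact ⟨hk, hv⟩

-- ===== VERDICT (by name: the statement is the Claim_ definition above) =====
theorem solution_spec : Claim_equal_solution := by
  intro str_list _
  unfold Spec_solution solution solution_alt
  have h := solutionGo_eq str_list str_list 0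
  simp only [Nat.cast_zero, Nat.zero_add] at h
  rw [h]
  cases hkl : PySem.List.index? str_list "l" with
  | none =>
    cases hkr : PySem.List.index? str_list "r" with
    | none => simp
    | some kr =>
      have hlen := index?_lt_length hkr
      simp only []
      rw [if_neg (by push_cast; omega), if_pos (by push_cast; omega)]
  | some kl =>
    have hlenl := index?_lt_length hkl
    cases hkr : PySem.List.index? str_list "r" with
    | none =>
      simp only []
      rw [if_pos (by push_cast; omega)]
    | some kr =>
      have hlenr := index?_lt_length hkr
      have hne : kl ≠ kr := by
        intro he
        obtain ⟨h1, hv1⟩ := index?_get hkl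
        obtain ⟨h2, hv2⟩ := index?_get hkr
        subst he
        rw [hv1] at hv2
        exact absurd hv2 (by decide)
      simp only []
      by_cases hlt : kl < kr
      · rw [if_pos hlt, if_pos (by push_cast; omega)]
      · rw [if_neg hlt, if_neg (by push_cast; omega), if_pos (by push_cast; omega)]
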